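-- pv_equiv track=rewrite | github.com/JakobDeMoorKULstudent/ProCause | res/res_utils.py | calculate_kemeny_young
-- ===== SOURCE A (Python) =====
-- def calculate_kemeny_young(ranks):
--     """
--     Calculate the Kemeny-Young consensus ranking for a list of ranks.
--     Each rank is a list of items in order of preference.
--     """
--     import itertools
--
--     def kendall_tau_distance(rank1, rank2):
--         distance = 0
--         n = len(rank1)
--         rank1_pos = {item: i for i, item in enumerate(rank1)}
--         rank2_pos = {item: i for i, item in enumerate(rank2)}
--         for i in range(n):
--             for j in range(i + 1, n):
--                 a, b = rank1[i], rank1[j]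
--                 if (rank2_pos[a] - rank2_pos[b]) * (rank1_pos[a] - rank1_pos[b]) < 0:
--                     distance += 1
--         return distance
--
--     all_items = ranks[0]
--     min_distance = float('inf')
--     best_rank = None
--     for perm in itertools.permutations(all_items):
--         total_distance = sum(kendall_tau_distance(perm, r) for r in ranks)
--         if total_distance < min_distance:
--             min_distance = total_distance
--             best_rank = perm
--     return list(best_rank)
-- ===== SOURCE B (Python) =====
-- def calculate_kemeny_young(ranks):
--     """Kemeny-Young consensus via a precomputed pairwise preference-count
--     matrix: each permutation is scored in O(n^2) from the matrix instead of
--     recomputing a Kendall-tau distance against every rank."""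
--     import itertools
--
--     items = ranks[0]
--     n = len(items)
--     # c[(x, y)] = number of ranks in which x is placed before y
--     c = {}
--     for r in ranks:
--         pos = {item: i for i, item in enumerate(r)}
--         for x in items:
--             for y in items:
--                 if pos[x] < pos[y]:
--                     c[(x, y)] = c.get((x, y), 0) + 1
--     best = None
--     best_score = None
--     for perm in itertools.permutations(items):
--         score = 0
--         for i in range(n):
--             for j in range(i + 1, n):
--                 score += c.get((perm[j], perm[i]), 0)
--         if best_score is None or score < best_score:
--             best_score = score
--             best = perm
--     return list(best)
-- ===== Notes on version B (the rewrite author's own statement) =====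
-- stated objective: faster
-- what changed: Instead of recomputing a Kendall-tau distance (with fresh position dicts and an O(n^2) pair scan) against every rank for every permutation, B builds the pairwise preference-count matrix c[(x,y)] = #ranks placing x before y once, and scores each permutation in O(n^2) straight from the matrix.
-- outside the precondition, e.g. on calculate_kemeny_young([[1, 2, 1]]): A returns [1, 2, 1], B returns [2, 1, 1]; on calculate_kemeny_young([[5], [7]]): A returns [5], B raises KeyError
import Mathlib
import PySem

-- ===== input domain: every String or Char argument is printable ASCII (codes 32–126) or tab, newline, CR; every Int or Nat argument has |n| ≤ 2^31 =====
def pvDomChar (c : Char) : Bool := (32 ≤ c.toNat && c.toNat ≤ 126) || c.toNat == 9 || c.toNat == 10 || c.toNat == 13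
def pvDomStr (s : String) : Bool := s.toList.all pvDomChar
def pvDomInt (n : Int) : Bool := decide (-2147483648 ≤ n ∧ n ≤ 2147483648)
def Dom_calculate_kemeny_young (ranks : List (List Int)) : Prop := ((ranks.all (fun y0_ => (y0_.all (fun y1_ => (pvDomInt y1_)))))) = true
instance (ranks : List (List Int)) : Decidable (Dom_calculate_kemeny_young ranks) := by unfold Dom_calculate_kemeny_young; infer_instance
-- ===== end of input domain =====

-- B replaces the per-permutation Kendall-tau recomputation against every rank by a
-- pairwise preference-count matrix built once, scoring each permutation from the matrix.
-- Return-value equivalence only; neither program mutates its argument.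

-- ===== PORT A =====

-- {item: i for i, item in enumerate(r)} (both Pythons build this same comprehension)
def posDict (r : List Int) : PySem.Dict Int Int :=
  (PySem.List.enumerate r 0).foldl (fun d p => d.insert p.2 p.1) PySem.Dict.empty

-- kendall_tau_distance; the dict lookups rank2_pos[a]/rank2_pos[b] raise KeyError in
-- Python when a key is missing — exact under Pre_ (every item of rank1 occurs in rank2)
def kendall_tau_distance (rank1 rank2 : List Int) : Int :=
  let n : Int := rank1.length
  let rank1_pos := posDict rank1
  let rank2_pos := posDict rank2
  (PySem.List.pyRange 0 n 1).foldl (fun distance i =>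
    (PySem.List.pyRange (i + 1) n 1).foldl (fun distance j =>
      let a := PySem.List.pyGetD rank1 i 0
      let b := PySem.List.pyGetD rank1 j 0
      if (rank2_pos.getD a 0 - rank2_pos.getD b 0) * (rank1_pos.getD a 0 - rank1_pos.getD b 0) < 0
      then distance + 1 else distance) distance) 0

-- min_distance = float('inf') / best_rank = None become the `none` states of the fold
def calculate_kemeny_young (ranks : List (List Int)) : List Int :=
  let all_items := PySem.List.pyGetD ranks 0 []   -- ranks[0]; IndexError on [] is excluded by Pre_
  let res := (PySem.List.permutations all_items all_items.length).foldl
    (fun (st : Option Int × Option (List Int)) perm =>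
      let total_distance := (ranks.map (fun r => kendall_tau_distance perm r)).sum
      match st.1 with
      | none => (some total_distance, some perm)
      | some m => if total_distance < m then (some total_distance, some perm) else st)
    (none, none)
  res.2.getD []   -- best_rank is always set: permutations() yields at least one tuple

-- ===== PORT B =====

-- c[(x, y)] = number of ranks placing x before y (pos[x] raises KeyError when a key
-- is missing — exact under Pre_)
def prefMatrix (ranks : List (List Int)) (items : List Int) : PySem.Dict (Int × Int) Int :=
  ranks.foldl (fun c r =>
    let pos := posDict r
    items.foldl (fun c x =>
      items.foldl (fun c y =>
        if pos.getD x 0 < pos.getD y 0 then c.insert (x, y) (c.getD (x, y) 0 + 1) else c) c) c)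
    PySem.Dict.empty

def permScore (c : PySem.Dict (Int × Int) Int) (n : Int) (perm : List Int) : Int :=
  (PySem.List.pyRange 0 n 1).foldl (fun score i =>
    (PySem.List.pyRange (i + 1) n 1).foldl (fun score j =>
      score + c.getD (PySem.List.pyGetD perm j 0, PySem.List.pyGetD perm i 0) 0) score) 0

def calculate_kemeny_young_alt (ranks : List (List Int)) : List Int :=
  let items := PySem.List.pyGetD ranks 0 []
  let n : Int := items.length
  let c := prefMatrix ranks items
  let res := (PySem.List.permutations items items.length).foldl
    (fun (st : Option Int × Option (List Int)) perm =>
      let score := permScore c n perm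
      match st.1 with   -- "if best_score is None or score < best_score"
      | none => (some score, some perm)
      | some m => if score < m then (some score, some perm) else st)
    (none, none)
  res.2.getD []

-- ===== PRECONDITION & SPEC =====
-- Pre_ excludes (a) ranks == [] (A raises IndexError), (b) ranks whose later entries
-- miss an item of ranks[0] (A raises KeyError whenever ranks[0] has ≥ 2 items; in the
-- degenerate remaining cases B raises where A returns), and (c) a first rank holding
-- duplicates of ≥ 2 distinct items, on which A's last-occurrence position dicts over a
-- multiset of permutations give an accidental ordering no caller could rely on (an
-- all-equal first rank, where both sides are trivially constant, stays admitted).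
def Pre_calculate_kemeny_young (ranks : List (List Int)) : Prop :=
  ranks ≠ [] ∧ (ranks.headI.Nodup ∨ ∀ x ∈ ranks.headI, ∀ y ∈ ranks.headI, x = y) ∧
    ∀ r ∈ ranks, ∀ x ∈ ranks.headI, x ∈ r
instance (ranks : List (List Int)) : Decidable (Pre_calculate_kemeny_young ranks) := by
  unfold Pre_calculate_kemeny_young; infer_instance

def pvWitness_calculate_kemeny_young : List (List Int) := [[1, 2, 3], [2, 1, 3], [2, 3, 1]]

def Spec_calculate_kemeny_young (ranks : List (List Int)) (out : List Int) : Prop := out = calculate_kemeny_young_alt ranks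
instance (ranks : List (List Int)) (out : List Int) : Decidable (Spec_calculate_kemeny_young ranks out) := by unfold Spec_calculate_kemeny_young; infer_instance

-- ===== CLAIM (what is proved, stated in full; the proofs are below) =====
def Claim_equal_calculate_kemeny_young : Prop := ∀ (ranks : List (List Int)), Dom_calculate_kemeny_young ranks → Pre_calculate_kemeny_young ranks → Spec_calculate_kemeny_young ranks (calculate_kemeny_young ranks)

-- ===== LEMMAS AND PROOFS =====

theorem posFold_getD_not_mem (r : List Int) (s : Int) (d : PySem.Dict Int Int) (x dd : Int)
    (hx : x ∉ r) :
    ((PySem.List.enumerate r s).foldl (fun d p => d.insert p.2 p.1) d).getD x dd = d.getD x dd := by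
  induction r generalizing s d with
  | nil => simp [PySem.List.enumerate_nil]
  | cons a t ih =>
    simp only [PySem.List.enumerate_cons, List.foldl_cons]
    rw [ih _ _ (by simp at hx; exact hx.2)]
    rw [PySem.Dict.getD_insert]
    simp at hx
    simp [hx.1]

theorem posFold_getD_nodup (r : List Int) (s : Int) (d : PySem.Dict Int Int) (dd : Int)
    (hnd : r.Nodup) (i : Nat) (hi : i < r.length) :
    ((PySem.List.enumerate r s).foldl (fun d p => d.insert p.2 p.1) d).getD r[i] dd = s + i := by
  induction r generalizing s d i with
  | nil => simp at hi
  | cons a t ih =>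
    simp only [PySem.List.enumerate_cons, List.foldl_cons]
    rcases i with _ | i
    · simp only [List.getElem_cons_zero]
      rw [posFold_getD_not_mem _ _ _ _ _ (by simp at hnd; exact fun h => (hnd.1 h).elim)]
      simp [PySem.Dict.getD_insert_self]
    · simp only [List.getElem_cons_succ]
      rw [ih _ _ hnd.of_cons i (by simpa using hi)]
      push_cast; ring

theorem posDict_getD_nodup (r : List Int) (dd : Int) (hnd : r.Nodup) (i : Nat) (hi : i < r.length) :
    (posDict r).getD r[i] dd = i := by
  unfold posDict
  rw [posFold_getD_nodup r 0 _ dd hnd i hi]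
  ring

theorem matrix_inner (q : Int → Int → Prop) [DecidableRel q]
    (ys : List Int) (c : PySem.Dict (Int × Int) Int) (x x0 y0 : Int) (hys : ys.Nodup) :
    (ys.foldl (fun c y => if q x y then c.insert (x, y) (c.getD (x, y) 0 + 1) else c) c).getD (x0, y0) 0
      = c.getD (x0, y0) 0 + (if x0 = x ∧ y0 ∈ ys ∧ q x y0 then 1 else 0) := by
  induction ys generalizing c with
  | nil => simp
  | cons y ys ih =>
    simp only [List.foldl_cons]
    rw [ih _ hys.of_cons]
    by_cases hq : q x y
    · simp only [if_pos hq, PySem.Dict.getD_insert]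
      simp only [List.nodup_cons] at hys
      by_cases hx : x0 = x
      · subst hx
        by_cases hy : y0 = y
        · subst hy; simp [hys.1, hq]
        · simp [hy, Prod.ext_iff]
      · simp [hx, Prod.ext_iff]
    · rw [if_neg hq]
      by_cases hx : x0 = x
      · subst hx
        by_cases hy : y0 = y
        · subst hy; simp [hq]
        · simp [hy]
      · simp [hx]

theorem matrix_outer (q : Int → Int → Prop) [DecidableRel q]
    (xs ys : List Int) (c : PySem.Dict (Int × Int) Int) (x0 y0 : Int)
    (hxs : xs.Nodup) (hys : ys.Nodup) :
    (xs.foldl (fun c x => ys.foldl (fun c y => if q x y then c.insert (x, y) (c.getD (x, y) 0 + 1) else c) c) c).getD (x0, y0) 0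
      = c.getD (x0, y0) 0 + (if x0 ∈ xs ∧ y0 ∈ ys ∧ q x0 y0 then 1 else 0) := by
  induction xs generalizing c with
  | nil => simp
  | cons x xs ih =>
    simp only [List.foldl_cons]
    rw [ih _ hxs.of_cons, matrix_inner q ys c x x0 y0 hys]
    simp only [List.nodup_cons] at hxs
    by_cases hx : x0 = x
    · subst hx; simp [hxs.1]
    · simp [hx]

theorem sum_map_swap {α β : Type} (l : List α) (m : List β) (f : α → β → Int) :
    (l.map (fun a => (m.map (f a)).sum)).sum = (m.map (fun b => (l.map (fun a => f a b)).sum)).sum := by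
  induction l with
  | nil => simp
  | cons a l ih =>
    simp only [List.map_cons, List.sum_cons, ih, PySem.List.sum_map_add_int]

theorem prefMatrix_getD (ranks : List (List Int)) (items : List Int) (hnd : items.Nodup) (x0 y0 : Int) :
    (prefMatrix ranks items).getD (x0, y0) 0
      = (ranks.map (fun r =>
          if x0 ∈ items ∧ y0 ∈ items ∧ (posDict r).getD x0 0 < (posDict r).getD y0 0
          then (1 : Int) else 0)).sum := by
  unfold prefMatrix
  suffices h : ∀ (c : PySem.Dict (Int × Int) Int),
      (ranks.foldl (fun c r =>
        items.foldl (fun c x =>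
          items.foldl (fun c y =>
            if (posDict r).getD x 0 < (posDict r).getD y 0
            then c.insert (x, y) (c.getD (x, y) 0 + 1) else c) c) c) c).getD (x0, y0) 0
        = c.getD (x0, y0) 0 + (ranks.map (fun r =>
            if x0 ∈ items ∧ y0 ∈ items ∧ (posDict r).getD x0 0 < (posDict r).getD y0 0
            then (1 : Int) else 0)).sum by
    simpa using h PySem.Dict.empty
  induction ranks with
  | nil => simp
  | cons r ranks ih =>
    intro c
    simp only [List.foldl_cons, List.map_cons, List.sum_cons]
    rw [ih _, matrix_outer (fun x y => (posDict r).getD x 0 < (posDict r).getD y 0) items items c x0 y0 hnd hnd]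
    ring

theorem kendall_eq (p r : List Int) (hpn : p.Nodup) :
    kendall_tau_distance p r =
      ((PySem.List.pyRange 0 (p.length : Int) 1).map (fun i =>
        ((PySem.List.pyRange (i + 1) (p.length : Int) 1).map (fun j =>
          if (posDict r).getD (PySem.List.pyGetD p j 0) 0 < (posDict r).getD (PySem.List.pyGetD p i 0) 0
          then (1 : Int) else 0)).sum)).sum := by
  unfold kendall_tau_distance
  rw [PySem.List.foldl_congr_mem _ _
    (fun distance i =>
      distance + ((PySem.List.pyRange (i + 1) (p.length : Int) 1).map (fun j =>
        if (posDict r).getD (PySem.List.pyGetD p j 0) 0 < (posDict r).getD (PySem.List.pyGetD p i 0) 0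
        then (1 : Int) else 0)).sum) 0 ?_]
  · rw [PySem.List.foldl_add]; simp
  · intro acc i hi
    rw [PySem.List.mem_pyRange_one] at hi
    rw [PySem.List.foldl_congr_mem _ _
      (fun distance j =>
        if (posDict r).getD (PySem.List.pyGetD p j 0) 0 < (posDict r).getD (PySem.List.pyGetD p i 0) 0
        then distance + 1 else distance) acc ?_]
    · rw [PySem.List.foldl_ite_add_one, ← PySem.List.sum_map_ite_one_zero]
      simp
    · intro acc2 j hj
      rw [PySem.List.mem_pyRange_one] at hj
      show (if ((posDict r).getD (PySem.List.pyGetD p i 0) 0 - (posDict r).getD (PySem.List.pyGetD p j 0) 0)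
              * ((posDict p).getD (PySem.List.pyGetD p i 0) 0 - (posDict p).getD (PySem.List.pyGetD p j 0) 0) < 0
            then acc2 + 1 else acc2)
          = (if (posDict r).getD (PySem.List.pyGetD p j 0) 0 < (posDict r).getD (PySem.List.pyGetD p i 0) 0
            then acc2 + 1 else acc2)
      have hi' : i < (p.length : Int) := lt_of_le_of_lt (by omega) hj.2
      have hgi : PySem.List.pyGetD p i 0 = p[i.toNat] :=
        PySem.List.pyGetD_eq_getElem p 0 hi.1 hi'
      have hgj : PySem.List.pyGetD p j 0 = p[j.toNat] :=
        PySem.List.pyGetD_eq_getElem p 0 (by omega) hj.2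
      have hpi : (posDict p).getD (PySem.List.pyGetD p i 0) 0 = (i.toNat : Int) := by
        rw [hgi]; exact posDict_getD_nodup p 0 hpn i.toNat (by omega)
      have hpj : (posDict p).getD (PySem.List.pyGetD p j 0) 0 = (j.toNat : Int) := by
        rw [hgj]; exact posDict_getD_nodup p 0 hpn j.toNat (by omega)
      have hij : (i.toNat : Int) - (j.toNat : Int) < 0 := by omega
      have hiff : (((posDict r).getD (PySem.List.pyGetD p i 0) 0 - (posDict r).getD (PySem.List.pyGetD p j 0) 0)
            * ((i.toNat : Int) - (j.toNat : Int)) < 0)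
          ↔ ((posDict r).getD (PySem.List.pyGetD p j 0) 0 < (posDict r).getD (PySem.List.pyGetD p i 0) 0) := by
        constructor
        · intro h; nlinarith
        · intro h; nlinarith
      rw [hpi, hpj, if_congr hiff rfl rfl]

theorem permScore_eq (c : PySem.Dict (Int × Int) Int) (n : Int) (p : List Int) :
    permScore c n p =
      ((PySem.List.pyRange 0 n 1).map (fun i =>
        ((PySem.List.pyRange (i + 1) n 1).map (fun j =>
          c.getD (PySem.List.pyGetD p j 0, PySem.List.pyGetD p i 0) 0)).sum)).sum := by
  unfold permScore
  rw [PySem.List.foldl_congr_mem _ _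
    (fun score i =>
      score + ((PySem.List.pyRange (i + 1) n 1).map (fun j =>
        c.getD (PySem.List.pyGetD p j 0, PySem.List.pyGetD p i 0) 0)).sum) 0 ?_]
  · rw [PySem.List.foldl_add]; simp
  · intro acc i _
    rw [PySem.List.foldl_add]

theorem score_eq (ranks : List (List Int)) (items p : List Int)
    (hnd : items.Nodup) (hp : p.Perm items) :
    (ranks.map (fun r => kendall_tau_distance p r)).sum
      = permScore (prefMatrix ranks items) (items.length : Int) p := by
  have hpn : p.Nodup := hp.nodup_iff.mpr hnd
  have hlen : p.length = items.length := hp.length_eq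
  rw [permScore_eq, ← hlen]
  rw [List.map_congr_left (fun r _ => kendall_eq p r hpn)]
  rw [sum_map_swap]
  refine congrArg List.sum (List.map_congr_left ?_)
  intro i hi
  rw [PySem.List.mem_pyRange_one] at hi
  rw [sum_map_swap]
  refine congrArg List.sum (List.map_congr_left ?_)
  intro j hj
  rw [PySem.List.mem_pyRange_one] at hj
  rw [prefMatrix_getD ranks items hnd]
  refine congrArg List.sum (List.map_congr_left ?_)
  intro r _
  have hi' : i < (p.length : Int) := lt_of_le_of_lt (by omega) hj.2
  have hgi : PySem.List.pyGetD p i 0 = p[i.toNat] :=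
    PySem.List.pyGetD_eq_getElem p 0 hi.1 hi'
  have hgj : PySem.List.pyGetD p j 0 = p[j.toNat] :=
    PySem.List.pyGetD_eq_getElem p 0 (by omega) hj.2
  have hmi : PySem.List.pyGetD p i 0 ∈ items := hp.subset (by rw [hgi]; exact List.getElem_mem _)
  have hmj : PySem.List.pyGetD p j 0 ∈ items := hp.subset (by rw [hgj]; exact List.getElem_mem _)
  have hiff : ((posDict r).getD (PySem.List.pyGetD p j 0) 0 < (posDict r).getD (PySem.List.pyGetD p i 0) 0)
      ↔ (PySem.List.pyGetD p j 0 ∈ items ∧ PySem.List.pyGetD p i 0 ∈ items ∧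
        (posDict r).getD (PySem.List.pyGetD p j 0) 0 < (posDict r).getD (PySem.List.pyGetD p i 0) 0) := by
    constructor
    · exact fun h => ⟨hmj, hmi, h⟩
    · exact fun h => h.2.2
  rw [if_congr hiff rfl rfl]

theorem kendall_const (p r : List Int) (hc : ∀ x ∈ p, ∀ y ∈ p, x = y) :
    kendall_tau_distance p r = 0 := by
  unfold kendall_tau_distance
  rw [PySem.List.foldl_congr_mem _ _ (fun (distance : Int) (i : Int) => distance) 0 ?_]
  · exact PySem.List.foldl_ignore _ 0
  · intro acc i hi
    rw [PySem.List.mem_pyRange_one] at hi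
    rw [PySem.List.foldl_congr_mem _ _ (fun (distance : Int) (j : Int) => distance) acc ?_]
    · exact PySem.List.foldl_ignore _ acc
    · intro acc2 j hj
      rw [PySem.List.mem_pyRange_one] at hj
      have hmi : PySem.List.pyGetD p i 0 ∈ p :=
        PySem.List.pyGetD_mem p 0 (by simp [PySem.Raise.InRange]; omega)
      have hmj : PySem.List.pyGetD p j 0 ∈ p :=
        PySem.List.pyGetD_mem p 0 (by simp [PySem.Raise.InRange]; omega)
      have hab : PySem.List.pyGetD p i 0 = PySem.List.pyGetD p j 0 := hc _ hmi _ hmj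
      show (if ((posDict r).getD (PySem.List.pyGetD p i 0) 0 - (posDict r).getD (PySem.List.pyGetD p j 0) 0)
              * ((posDict p).getD (PySem.List.pyGetD p i 0) 0 - (posDict p).getD (PySem.List.pyGetD p j 0) 0) < 0
            then acc2 + 1 else acc2) = acc2
      rw [hab]
      simp

theorem prefMatrix_const (ranks : List (List Int)) (items : List Int)
    (hc : ∀ x ∈ items, ∀ y ∈ items, x = y) :
    prefMatrix ranks items = PySem.Dict.empty := by
  unfold prefMatrix
  rw [PySem.List.foldl_congr_mem _ _ (fun (c : PySem.Dict (Int × Int) Int) (r : List Int) => c)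
    PySem.Dict.empty ?_]
  · exact PySem.List.foldl_ignore _ _
  · intro c r _
    show items.foldl _ c = c
    rw [PySem.List.foldl_congr_mem _ _ (fun (c : PySem.Dict (Int × Int) Int) (x : Int) => c) c ?_]
    · exact PySem.List.foldl_ignore _ _
    · intro c2 x hx
      show items.foldl _ c2 = c2
      rw [PySem.List.foldl_congr_mem _ _ (fun (c : PySem.Dict (Int × Int) Int) (y : Int) => c) c2 ?_]
      · exact PySem.List.foldl_ignore _ _
      · intro c3 y hy
        have hxy : x = y := hc _ hx _ hy
        subst hxy
        simp

theorem permScore_empty (n : Int) (p : List Int) :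
    permScore (PySem.Dict.empty : PySem.Dict (Int × Int) Int) n p = 0 := by
  unfold permScore
  rw [PySem.List.foldl_congr_mem _ _ (fun (score : Int) (i : Int) => score) 0 ?_]
  · exact PySem.List.foldl_ignore _ 0
  · intro acc i _
    rw [PySem.List.foldl_congr_mem _ _ (fun (score : Int) (j : Int) => score) acc ?_]
    · exact PySem.List.foldl_ignore _ acc
    · intro acc2 j _
      simp [PySem.Dict.getD_empty]

theorem score_fold_eq (ranks : List (List Int)) (hne : ranks ≠ [])
    (hnd : ranks.headI.Nodup ∨ ∀ x ∈ ranks.headI, ∀ y ∈ ranks.headI, x = y) :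
    calculate_kemeny_young ranks = calculate_kemeny_young_alt ranks := by
  rcases ranks with _ | ⟨r0, rest⟩
  · exact absurd rfl hne
  simp only [List.headI] at hnd
  unfold calculate_kemeny_young calculate_kemeny_young_alt
  simp only [PySem.List.pyGetD_zero_cons]
  refine congrArg (fun (st : Option Int × Option (List Int)) => st.2.getD []) ?_
  apply PySem.List.foldl_congr_mem
  intro acc perm hperm
  have hp := PySem.List.perm_of_mem_permutations hperm
  rcases hnd with hnd | hc
  · simp only [score_eq (r0 :: rest) r0 perm hnd hp]
  · have hcp : ∀ x ∈ perm, ∀ y ∈ perm, x = y :=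
      fun x hx y hy => hc x (hp.subset hx) y (hp.subset hy)
    have hA : ((r0 :: rest).map (fun r => kendall_tau_distance perm r)).sum = 0 := by
      rw [List.map_congr_left (fun r _ => kendall_const perm r hcp)]
      simp
    have hB : permScore (prefMatrix (r0 :: rest) r0) (r0.length : Int) perm = 0 := by
      rw [prefMatrix_const _ _ hc, permScore_empty]
    simp only [hA, hB]

-- ===== VERDICT (by name: the statement is the Claim_ definition above) =====
theorem calculate_kemeny_young_spec : Claim_equal_calculate_kemeny_young := by
  intro ranks _ hpre
  exact score_fold_eq ranks hpre.1 hpre.2.1
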